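-- pv_equiv track=rewrite | github.com/smk762/atomicDEX_pystats | stats_lib_v2.py | get_guis_list
-- ===== SOURCE A (Python) =====
-- def get_valid_guis(swaps_summary):
--     valid_guis = []
--     for uuid in swaps_summary:
--         gui = swaps_summary[uuid]['maker_gui']
--         if gui != 'N/A':
--             if gui not in valid_guis:
--                 valid_guis.append(gui)
--         gui = swaps_summary[uuid]['taker_gui']
--         if gui != 'N/A':
--             if gui not in valid_guis:
--                 valid_guis.append(gui)
--     return valid_guis
--
-- def get_guis_list(swaps_summary, role='both'):
--     guis_list = []
--     if role == 'both':
--         guis_list = get_valid_guis(swaps_summary)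
--     elif role == 'maker':
--         for uuid in swaps_summary:
--             if swaps_summary[uuid]['maker_gui'] not in guis_list:
--                 guis_list.append(swaps_summary[uuid]['maker_gui'])
--     elif role == 'taker':
--         for uuid in swaps_summary:
--             if swaps_summary[uuid]['taker_gui'] not in guis_list:
--                 guis_list.append(swaps_summary[uuid]['taker_gui'])
--     return guis_list
-- ===== SOURCE B (Python) =====
-- def _dedup(xs):
--     # keep first occurrence, recursively strip later duplicates of the head
--     if not xs:
--         return []
--     head = xs[0]
--     return [head] + _dedup([x for x in xs[1:] if x != head])
--
-- def get_guis_list(swaps_summary, role='both'):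
--     swaps = [swaps_summary[u] for u in swaps_summary]
--     if role == 'both':
--         cands = [g for s in swaps
--                  for g in (s['maker_gui'], s['taker_gui']) if g != 'N/A']
--     elif role == 'maker':
--         cands = [s['maker_gui'] for s in swaps]
--     elif role == 'taker':
--         cands = [s['taker_gui'] for s in swaps]
--     else:
--         cands = []
--     return _dedup(cands)
-- ===== Notes on version B (the rewrite author's own statement) =====
-- stated objective: alternative
-- what changed: B stages the work: role-specific comprehensions build one flat candidate list (role decided once, no per-element branching or accumulator), then duplicates are removed by a recursive head-filter dedup that strips later duplicates out of the remaining input, instead of A's interleaved 'if gui not in list: append' membership-guarded accumulation.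
import Mathlib
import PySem

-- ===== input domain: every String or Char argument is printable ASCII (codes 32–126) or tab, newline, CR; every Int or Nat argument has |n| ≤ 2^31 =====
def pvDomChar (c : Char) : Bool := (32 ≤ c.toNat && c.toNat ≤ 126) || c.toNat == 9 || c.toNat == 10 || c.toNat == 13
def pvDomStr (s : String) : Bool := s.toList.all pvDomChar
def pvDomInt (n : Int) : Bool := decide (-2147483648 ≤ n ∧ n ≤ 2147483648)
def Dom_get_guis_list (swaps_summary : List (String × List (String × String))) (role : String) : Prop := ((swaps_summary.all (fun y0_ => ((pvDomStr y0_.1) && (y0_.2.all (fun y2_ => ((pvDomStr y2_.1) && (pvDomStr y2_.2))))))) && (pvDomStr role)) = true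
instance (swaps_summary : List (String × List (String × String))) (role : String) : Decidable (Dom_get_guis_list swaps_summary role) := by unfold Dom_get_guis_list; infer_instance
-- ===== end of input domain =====

-- B stages the work (role-specific candidate comprehensions, then a recursive
-- head-filter dedup that strips later duplicates from the remaining input)
-- instead of A's interleaved membership-guarded appends; objective: alternative.

-- ===== PORT A =====
def get_valid_guis (swaps_summary : List (String × List (String × String))) : List String :=
  swaps_summary.foldl (fun valid_guis kv =>
    let gui := (PySem.Dict.ofList kv.2).getD "maker_gui" ""
    let valid_guis := if gui ≠ "N/A" then (if gui ∉ valid_guis then valid_guis ++ [gui] else valid_guis) else valid_guis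
    let gui := (PySem.Dict.ofList kv.2).getD "taker_gui" ""
    if gui ≠ "N/A" then (if gui ∉ valid_guis then valid_guis ++ [gui] else valid_guis) else valid_guis) []

def get_guis_list (swaps_summary : List (String × List (String × String))) (role : String) : List String :=
  let guis_list : List String := []
  if role = "both" then get_valid_guis swaps_summary
  else if role = "maker" then
    swaps_summary.foldl (fun guis_list kv =>
      let g := (PySem.Dict.ofList kv.2).getD "maker_gui" ""
      if g ∉ guis_list then guis_list ++ [g] else guis_list) guis_list
  else if role = "taker" then
    swaps_summary.foldl (fun guis_list kv =>
      let g := (PySem.Dict.ofList kv.2).getD "taker_gui" ""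
      if g ∉ guis_list then guis_list ++ [g] else guis_list) guis_list
  else guis_list

-- ===== PORT B =====
-- recursive head-filter dedup: keep the head, recurse on the remainder with
-- the head's later duplicates filtered out (port of Source B's _dedup)
def pvDedup : List String → List String
  | [] => []
  | x :: tl => x :: pvDedup (tl.filter (fun y => y ≠ x))
termination_by l => l.length
decreasing_by
  simp only [List.length_cons, List.length_unattach]
  exact Nat.lt_succ_of_le (le_trans (List.length_filter_le _ tl.attach)
    (le_of_eq List.length_attach))

def get_guis_list_alt (swaps_summary : List (String × List (String × String))) (role : String) : List String :=
  let swaps := swaps_summary.map (fun kv => PySem.Dict.ofList kv.2)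
  let cands :=
    if role = "both" then
      swaps.flatMap (fun s => [s.getD "maker_gui" "", s.getD "taker_gui" ""].filter (fun g => g ≠ "N/A"))
    else if role = "maker" then swaps.map (fun s => s.getD "maker_gui" "")
    else if role = "taker" then swaps.map (fun s => s.getD "taker_gui" "")
    else []
  pvDedup cands

-- ===== PRECONDITION & SPEC =====
-- Pre_ excludes exactly the inputs where A raises KeyError: an inner dict missing a
-- 'maker_gui'/'taker_gui' key that the chosen role looks up.
def Pre_get_guis_list (swaps_summary : List (String × List (String × String))) (role : String) : Prop :=
  ((role = "both" ∨ role = "maker") → ∀ p ∈ swaps_summary, "maker_gui" ∈ p.2.map Prod.fst) ∧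
  ((role = "both" ∨ role = "taker") → ∀ p ∈ swaps_summary, "taker_gui" ∈ p.2.map Prod.fst)
instance (swaps_summary : List (String × List (String × String))) (role : String) : Decidable (Pre_get_guis_list swaps_summary role) := by unfold Pre_get_guis_list; infer_instance

def pvWitness_get_guis_list : (List (String × List (String × String))) × String :=
  ([("u1", [("maker_gui", "gui_a"), ("taker_gui", "N/A")])], "both")

def Spec_get_guis_list (swaps_summary : List (String × List (String × String))) (role : String) (out : List String) : Prop := out = get_guis_list_alt swaps_summary role
instance (swaps_summary : List (String × List (String × String))) (role : String) (out : List String) : Decidable (Spec_get_guis_list swaps_summary role out) := by unfold Spec_get_guis_list; infer_instance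

-- ===== CLAIM =====
def Claim_equal_get_guis_list : Prop := ∀ (swaps_summary : List (String × List (String × String))) (role : String), Dom_get_guis_list swaps_summary role → Pre_get_guis_list swaps_summary role → Spec_get_guis_list swaps_summary role (get_guis_list swaps_summary role)

-- ===== LEMMAS AND PROOFS =====

-- folding conditional inserts over the whole list = folding them over the flattened candidates
theorem foldl_blocks (f : List String → (String × List (String × String)) → List String)
    (g : (String × List (String × String)) → List String)
    (h : ∀ acc kv, f acc kv = (g kv).foldl (fun a x => if x ∉ a then a ++ [x] else a) acc) :
    ∀ (ss : List (String × List (String × String))) (acc : List String),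
      ss.foldl f acc = (ss.flatMap g).foldl (fun a x => if x ∉ a then a ++ [x] else a) acc := by
  intro ss
  induction ss with
  | nil => intro acc; rfl
  | cons kv tl ih =>
      intro acc
      simp only [List.foldl_cons, List.flatMap_cons, List.foldl_append, h, ih]

-- one-field candidate blocks flatten to a map
theorem flatMap_single (f : (String × List (String × String)) → String)
    (ss : List (String × List (String × String))) :
    ss.flatMap (fun kv => [f kv]) = ss.map f := by
  induction ss with
  | nil => rfl
  | cons a t ih => simp [ih]

-- A's membership-guarded accumulation equals B's recursive head-filter dedup
theorem foldl_ins_general (xs : List String) :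
    ∀ acc, xs.foldl (fun a x => if x ∉ a then a ++ [x] else a) acc
      = acc ++ pvDedup (xs.filter (fun x => decide (x ∉ acc))) := by
  induction xs with
  | nil => intro acc; simp [pvDedup]
  | cons x tl ih =>
      intro acc
      by_cases hx : x ∈ acc
      · rw [List.foldl_cons, if_neg (not_not_intro hx), List.filter_cons,
          if_neg (by simp [hx])]
        exact ih acc
      · rw [List.foldl_cons, if_pos hx, ih (acc ++ [x]), List.filter_cons,
          if_pos (by simp [hx]), pvDedup, List.append_assoc, List.singleton_append,
          List.filter_filter]
        have hf : List.filter (fun y => decide (y ∉ acc ++ [x])) tl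
            = List.filter (fun a => decide (a ≠ x) && decide (a ∉ acc)) tl :=
          List.filter_congr (by
            intro a _
            by_cases hax : a = x <;> by_cases ha : a ∈ acc <;>
              simp [hax, ha, List.mem_append])
        rw [hf]

theorem ins_foldl_eq_pvDedup (xs : List String) :
    xs.foldl (fun a x => if x ∉ a then a ++ [x] else a) [] = pvDedup xs := by
  have := foldl_ins_general xs []
  simpa using this

-- ===== VERDICT =====
theorem get_guis_list_spec : Claim_equal_get_guis_list := by
  intro ss role _hdom _hpre
  unfold Spec_get_guis_list get_guis_list get_guis_list_alt get_valid_guis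
  by_cases hb : role = "both"
  · simp only [hb, String.reduceEq, reduceIte]
    rw [foldl_blocks _ (fun kv => [(PySem.Dict.ofList kv.2).getD "maker_gui" "",
          (PySem.Dict.ofList kv.2).getD "taker_gui" ""].filter (fun g => g ≠ "N/A"))
        (by
          intro acc kv
          by_cases h1 : (PySem.Dict.ofList kv.2).getD "maker_gui" "" = "N/A" <;>
            by_cases h2 : (PySem.Dict.ofList kv.2).getD "taker_gui" "" = "N/A" <;>
              simp [h1, h2, List.foldl])]
    rw [ins_foldl_eq_pvDedup]
    simp [List.flatMap_map]
  · by_cases hm : role = "maker"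
    · simp only [hm, String.reduceEq, reduceIte]
      rw [foldl_blocks _ (fun kv => [(PySem.Dict.ofList kv.2).getD "maker_gui" ""])
          (by intro acc kv; simp [List.foldl])]
      rw [ins_foldl_eq_pvDedup]
      rw [flatMap_single]
      rw [List.map_map]; rfl
    · by_cases ht : role = "taker"
      · simp only [ht, String.reduceEq, reduceIte]
        rw [foldl_blocks _ (fun kv => [(PySem.Dict.ofList kv.2).getD "taker_gui" ""])
            (by intro acc kv; simp [List.foldl])]
        rw [ins_foldl_eq_pvDedup]
        rw [flatMap_single]
        rw [List.map_map]; rfl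
      · simp [hb, hm, ht, pvDedup]
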